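-- pv_equiv track=rewrite | github.com/ats-ito/Geister-cpp-lib | pytools/analyzer.py | existNeighbor
-- ===== SOURCE A (Python) =====
-- def existNeighbor(x, y, side, board):
--     if side == 1:
--         for i in range(8):
--             nx = int(board[i * 3])
--             ny = int(board[i * 3 + 1])
--             if x == nx+1 and y == ny:
--                 return True
--             if x == nx-1 and y == ny:
--                 return True
--             if x == nx and y == ny+1:
--                 return True
--             if x == nx and y == ny-1:
--                 return True
--     if side == 2:
--         for i in range(8):
--             nx = int(board[i * 3 + 24])
--             ny = int(board[i * 3 + 1 + 24])
--             if x == nx+1 and y == ny: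
--                 return True
--             if x == nx-1 and y == ny:
--                 return True
--             if x == nx and y == ny+1:
--                 return True
--             if x == nx and y == ny-1:
--                 return True
--     return False
-- ===== SOURCE B (Python) =====
-- def existNeighbor(x, y, side, board):
--     if side not in (1, 2):
--         return False
--     cells = board[(side - 1) * 24:(side - 1) * 24 + 24]
--     dists = []
--     while len(cells) >= 2:
--         dists.append(abs(x - int(cells[0])) + abs(y - int(cells[1])))
--         cells = cells[3:]
--     return 1 in dists
-- ===== Notes on version B (the rewrite author's own statement) =====
-- stated objective: alternative
-- what changed: Instead of scanning 8 pieces and testing 4 directional equality branches per piece with early return, B slices out the side's 24-cell block, walks it three cells at a time accumulating the Manhattan distance of each piece to (x,y), and answers by testing whether 1 occurs in that distance list.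
-- outside the precondition, e.g. on existNeighbor(5, 5, 1, [0, 0, 0]): A raises IndexError, B returns False; on existNeighbor(1, 0, 1, [0, 0, 0]): A returns True, B returns True
import Mathlib
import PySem

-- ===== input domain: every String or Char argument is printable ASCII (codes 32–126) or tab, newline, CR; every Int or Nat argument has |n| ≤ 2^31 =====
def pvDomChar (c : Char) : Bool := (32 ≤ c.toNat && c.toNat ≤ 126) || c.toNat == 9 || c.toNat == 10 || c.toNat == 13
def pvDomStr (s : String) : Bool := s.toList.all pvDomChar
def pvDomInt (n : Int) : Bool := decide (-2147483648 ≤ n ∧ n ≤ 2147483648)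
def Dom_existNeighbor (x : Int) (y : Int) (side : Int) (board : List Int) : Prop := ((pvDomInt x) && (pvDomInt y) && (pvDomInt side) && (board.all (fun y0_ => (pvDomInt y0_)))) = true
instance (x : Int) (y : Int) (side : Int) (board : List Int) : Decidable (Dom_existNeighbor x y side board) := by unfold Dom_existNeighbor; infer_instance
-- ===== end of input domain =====

-- B replaces A's 8-piece scan with 4 directional equality branches per piece (early return)
-- by slicing the side's 24-cell block, walking it 3 cells at a time into a list of Manhattan
-- distances to (x,y), and testing whether 1 occurs in that list (alternative decomposition).

-- ===== PORT A =====
-- A's per-side loop 'for i in range(8)' with early return; off is 0 (side 1) or 24 (side 2).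
-- pyGetD is only read in range under Pre_existNeighbor (out of range Python raises IndexError).
def existNeighborLoop (x : Int) (y : Int) (board : List Int) (off : Int) : List Int → Bool
  | [] => false
  | i :: rest =>
    let nx := PySem.List.pyGetD board (i * 3 + off) 0
    let ny := PySem.List.pyGetD board (i * 3 + 1 + off) 0
    if x = nx + 1 ∧ y = ny then true
    else if x = nx - 1 ∧ y = ny then true
    else if x = nx ∧ y = ny + 1 then true
    else if x = nx ∧ y = ny - 1 then true
    else existNeighborLoop x y board off rest

def existNeighbor (x : Int) (y : Int) (side : Int) (board : List Int) : Bool :=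
  if side = 1 then existNeighborLoop x y board 0 (PySem.List.pyRange 0 8 1)
  else if side = 2 then existNeighborLoop x y board 24 (PySem.List.pyRange 0 8 1)
  else false

-- ===== PORT B =====
-- Source B's while loop: consume the block 3 cells at a time, recording |x-nx|+|y-ny| per piece.
def distWalk (x : Int) (y : Int) : List Int → List Int
  | a :: b :: rest => (|x - a| + |y - b|) :: distWalk x y (rest.drop 1)
  | _ => []
termination_by l => l.length
decreasing_by simp; omega

def existNeighbor_alt (x : Int) (y : Int) (side : Int) (board : List Int) : Bool :=
  if side = 1 ∨ side = 2 then
    let cells := PySem.List.slice board (some ((side - 1) * 24)) (some ((side - 1) * 24 + 24))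
    (distWalk x y cells).contains 1
  else false

-- ===== PRECONDITION & SPEC =====
-- Pre_ excludes boards shorter than the scanned side's index range (< 23 cells for side 1,
-- < 47 for side 2): there A raises IndexError unless an early piece happens to match before
-- the first out-of-range read, while B's slice silently truncates to the available pieces.
def Pre_existNeighbor (x : Int) (y : Int) (side : Int) (board : List Int) : Prop :=
  (side = 1 → 23 ≤ board.length) ∧ (side = 2 → 47 ≤ board.length)
instance (x : Int) (y : Int) (side : Int) (board : List Int) : Decidable (Pre_existNeighbor x y side board) := by unfold Pre_existNeighbor; infer_instance
def pvWitness_existNeighbor : Int × Int × Int × List Int :=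
  (2, 1, 1, [1, 1, 0, 0, 0, 0, 1, 0, 0, 2, 0, 0, 3, 0, 0, 0, 1, 0, 1, 2, 0, 2, 2, 0])

def Spec_existNeighbor (x : Int) (y : Int) (side : Int) (board : List Int) (out : Bool) : Prop := out = existNeighbor_alt x y side board
instance (x : Int) (y : Int) (side : Int) (board : List Int) (out : Bool) : Decidable (Spec_existNeighbor x y side board out) := by unfold Spec_existNeighbor; infer_instance

-- ===== CLAIM (what is proved, stated in full; the proofs are below) =====
def Claim_equal_existNeighbor : Prop := ∀ (x : Int) (y : Int) (side : Int) (board : List Int), Dom_existNeighbor x y side board → Pre_existNeighbor x y side board → Spec_existNeighbor x y side board (existNeighbor x y side board)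

-- ===== LEMMAS AND PROOFS =====

-- A's four branches for one piece say exactly 'Manhattan distance 1'.
theorem abs_pair (x y nx ny : Int) :
    (|x - nx| + |y - ny| = 1) ↔
      (x = nx + 1 ∧ y = ny) ∨ (x = nx - 1 ∧ y = ny) ∨ (x = nx ∧ y = ny + 1) ∨ (x = nx ∧ y = ny - 1) := by
  rcases abs_cases (x - nx) with ⟨h1, h2⟩ | ⟨h1, h2⟩ <;>
    rcases abs_cases (y - ny) with ⟨h3, h4⟩ | ⟨h3, h4⟩ <;> omega

theorem loop_iff (x y off : Int) (board : List Int) (l : List Int) :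
    existNeighborLoop x y board off l = true ↔
      ∃ i ∈ l,
        (x = PySem.List.pyGetD board (i * 3 + off) 0 + 1 ∧ y = PySem.List.pyGetD board (i * 3 + 1 + off) 0)
        ∨ (x = PySem.List.pyGetD board (i * 3 + off) 0 - 1 ∧ y = PySem.List.pyGetD board (i * 3 + 1 + off) 0)
        ∨ (x = PySem.List.pyGetD board (i * 3 + off) 0 ∧ y = PySem.List.pyGetD board (i * 3 + 1 + off) 0 + 1)
        ∨ (x = PySem.List.pyGetD board (i * 3 + off) 0 ∧ y = PySem.List.pyGetD board (i * 3 + 1 + off) 0 - 1) := by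
  induction l with
  | nil => simp [existNeighborLoop]
  | cons i rest ih =>
    simp only [existNeighborLoop, List.mem_cons, exists_eq_or_imp]
    split_ifs with h1 h2 h3 h4 <;> simp_all

-- distWalk's membership of 1 characterised by the indices it reads.
theorem distWalk_iff (x y : Int) : ∀ (l : List Int),
    (distWalk x y l).contains 1 = true ↔
      ∃ j : Nat, 3 * j + 1 < l.length ∧ |x - (l[3 * j]?.getD 0)| + |y - (l[3 * j + 1]?.getD 0)| = 1
  | [] => by simp [distWalk]
  | [a] => by
      simp only [distWalk, List.contains_eq_mem, List.not_mem_nil, List.length_singleton]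
      constructor
      · intro h; simp at h
      · rintro ⟨j, hj, _⟩; omega
  | a :: b :: rest => by
      have ih := distWalk_iff x y (rest.drop 1)
      simp only [distWalk, List.contains_eq_mem, List.mem_cons, decide_eq_true_eq] at ih ⊢
      constructor
      · rintro (h | h)
        · exact ⟨0, by simp, by simpa using h.symm⟩
        · obtain ⟨j, hj, hd⟩ := ih.mp (by simpa using h)
          refine ⟨j + 1, ?_, ?_⟩
          · simp at hj ⊢; omega
          · have e1 : (3 * (j + 1) : Nat) = (3 * j + 1) + 2 := by omega
            rw [e1]
            have e2 : ((3 * j + 1) + 2 + 1 : Nat) = (3 * j + 2) + 2 := by omega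
            rw [e2]
            have g1 : (a :: b :: rest)[(3 * j + 1) + 2]? = (rest.drop 1)[3 * j]? := by
              simp
            have g2 : (a :: b :: rest)[(3 * j + 2) + 2]? = (rest.drop 1)[3 * j + 1]? := by
              simp
            rw [g1, g2]; exact hd
      · rintro ⟨j, hj, hd⟩
        cases j with
        | zero => left; simpa using hd.symm
        | succ j =>
          right
          have e1 : (3 * (j + 1) : Nat) = (3 * j + 1) + 2 := by omega
          rw [e1] at hd
          have e2 : ((3 * j + 1) + 2 + 1 : Nat) = (3 * j + 2) + 2 := by omega
          rw [e2] at hd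
          have g1 : (a :: b :: rest)[(3 * j + 1) + 2]? = (rest.drop 1)[3 * j]? := by
            simp
          have g2 : (a :: b :: rest)[(3 * j + 2) + 2]? = (rest.drop 1)[3 * j + 1]? := by
            simp
          rw [g1, g2] at hd
          exact ih.mpr ⟨j, by simp at hj ⊢; omega, hd⟩
  termination_by l => l.length
  decreasing_by simp; omega

-- One side: A's loop over range(8) at offset `base` equals B's walk of the 24-cell slice.
theorem side_eq (x y : Int) (board : List Int) (base : Nat) (h : base + 23 ≤ board.length) :
    existNeighborLoop x y board (base : Int) (PySem.List.pyRange 0 8 1)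
      = (distWalk x y ((board.drop base).take 24)).contains 1 := by
  rw [Bool.eq_iff_iff, loop_iff, distWalk_iff]
  have hlen : ((board.drop base).take 24).length = min 24 (board.length - base) := by simp
  have hget : ∀ m : Nat, m < 24 → ((board.drop base).take 24)[m]?.getD 0 = board.getD (base + m) 0 := by
    intro m hm
    rw [List.getElem?_take_of_lt hm, List.getElem?_drop, List.getD_eq_getElem?_getD]
  constructor
  · rintro ⟨i, hi, hcase⟩
    rw [PySem.List.mem_pyRange_one] at hi
    obtain ⟨j, rfl⟩ : ∃ j : Nat, i = (j : Int) := ⟨i.toNat, (Int.toNat_of_nonneg hi.1).symm⟩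
    have hj : j < 8 := by exact_mod_cast hi.2
    have hx : PySem.List.pyGetD board ((j : Int) * 3 + (base : Int)) 0 = board.getD (base + 3 * j) 0 := by
      have : ((j : Int) * 3 + (base : Int)) = ((base + 3 * j : Nat) : Int) := by push_cast; ring
      rw [this, PySem.List.pyGetD_natCast]
    have hy : PySem.List.pyGetD board ((j : Int) * 3 + 1 + (base : Int)) 0 = board.getD (base + (3 * j + 1)) 0 := by
      have : ((j : Int) * 3 + 1 + (base : Int)) = ((base + (3 * j + 1) : Nat) : Int) := by push_cast; ring
      rw [this, PySem.List.pyGetD_natCast]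
    rw [hx, hy] at hcase
    refine ⟨j, by omega, ?_⟩
    rw [hget (3 * j) (by omega), hget (3 * j + 1) (by omega)]
    exact (abs_pair x y _ _).mpr hcase
  · rintro ⟨j, hj, hd⟩
    have hj8 : j < 8 := by omega
    rw [hget (3 * j) (by omega), hget (3 * j + 1) (by omega)] at hd
    refine ⟨(j : Int), by
      rw [PySem.List.mem_pyRange_one]
      refine ⟨Int.natCast_nonneg j, ?_⟩
      exact_mod_cast hj8, ?_⟩
    have hx : PySem.List.pyGetD board ((j : Int) * 3 + (base : Int)) 0 = board.getD (base + 3 * j) 0 := by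
      have : ((j : Int) * 3 + (base : Int)) = ((base + 3 * j : Nat) : Int) := by push_cast; ring
      rw [this, PySem.List.pyGetD_natCast]
    have hy : PySem.List.pyGetD board ((j : Int) * 3 + 1 + (base : Int)) 0 = board.getD (base + (3 * j + 1)) 0 := by
      have : ((j : Int) * 3 + 1 + (base : Int)) = ((base + (3 * j + 1) : Nat) : Int) := by push_cast; ring
      rw [this, PySem.List.pyGetD_natCast]
    rw [hx, hy]
    exact (abs_pair x y _ _).mp hd

-- ===== VERDICT (by name: the statement is the Claim_ definition above) =====
theorem existNeighbor_spec : Claim_equal_existNeighbor := by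
  intro x y side board _ hpre
  unfold Spec_existNeighbor existNeighbor existNeighbor_alt
  by_cases h1 : side = 1
  · subst h1
    rw [if_pos rfl, if_pos (Or.inl rfl)]
    have hlen := hpre.1 rfl
    have : PySem.List.slice board (some ((1 - 1) * 24)) (some ((1 - 1) * 24 + 24))
        = (board.drop 0).take 24 := by
      norm_num
      rw [PySem.List.slice_to board (by norm_num)]
      rfl
    rw [this]
    exact_mod_cast side_eq x y board 0 (by omega)
  · by_cases h2 : side = 2
    · subst h2
      rw [if_neg (by norm_num), if_pos rfl, if_pos (Or.inr rfl)]
      have hlen := hpre.2 rfl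
      have : PySem.List.slice board (some ((2 - 1) * 24)) (some ((2 - 1) * 24 + 24))
          = (board.drop 24).take 24 := by
        norm_num
        rw [PySem.List.slice_toNat board (by norm_num) (by norm_num)]
        rfl
      rw [this]
      exact_mod_cast side_eq x y board 24 (by omega)
    · rw [if_neg h1, if_neg h2, if_neg (by tauto : ¬(side = 1 ∨ side = 2))]
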